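-- pv_equiv track=rewrite | github.com/elfhosted/redbot-cogs | logscan/logscan.py | format_contiguous_lines
-- ===== SOURCE A (Python) =====
-- def format_contiguous_lines(line_numbers):
--     formatted_ranges = []
--     start_range = line_numbers[0]
--     end_range = line_numbers[0]
--
--     for i in range(1, len(line_numbers)):
--         if line_numbers[i] == line_numbers[i - 1] + 1:
--             end_range = line_numbers[i]
--         else:
--             if start_range == end_range:
--                 formatted_ranges.append(str(start_range))
--             else:
--                 formatted_ranges.append(f"{start_range}-{end_range}")
--             start_range = end_range = line_numbers[i]
--
--     if start_range == end_range:
--         formatted_ranges.append(str(start_range))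
--     else:
--         formatted_ranges.append(f"{start_range}-{end_range}")
--
--     return ", ".join(formatted_ranges)
-- ===== SOURCE B (Python) =====
-- def format_contiguous_lines(line_numbers):
--     # Stateless boundary detection: an element is a run start iff it is first or
--     # does not follow its predecessor; a run end iff it is last or the next
--     # element does not follow it.  Runs = zip(starts, ends).
--     n = len(line_numbers)
--     starts = [line_numbers[i] for i in range(n)
--               if i == 0 or line_numbers[i] != line_numbers[i - 1] + 1]
--     ends = [line_numbers[i] for i in range(n)
--             if i == n - 1 or line_numbers[i + 1] != line_numbers[i] + 1]
--     return ", ".join(str(s) if s == e else f"{s}-{e}"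
--                      for s, e in zip(starts, ends))
-- ===== Notes on version B (the rewrite author's own statement) =====
-- stated objective: alternative
-- what changed: B has no running state at all: it detects run boundaries by comparing each element with its neighbours (start iff first or not predecessor+1, end iff last or next is not successor), builds the starts and ends lists independently, and zips them into runs, instead of A's stateful loop that tracks an open range and closes it as it scans.
import Mathlib
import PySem

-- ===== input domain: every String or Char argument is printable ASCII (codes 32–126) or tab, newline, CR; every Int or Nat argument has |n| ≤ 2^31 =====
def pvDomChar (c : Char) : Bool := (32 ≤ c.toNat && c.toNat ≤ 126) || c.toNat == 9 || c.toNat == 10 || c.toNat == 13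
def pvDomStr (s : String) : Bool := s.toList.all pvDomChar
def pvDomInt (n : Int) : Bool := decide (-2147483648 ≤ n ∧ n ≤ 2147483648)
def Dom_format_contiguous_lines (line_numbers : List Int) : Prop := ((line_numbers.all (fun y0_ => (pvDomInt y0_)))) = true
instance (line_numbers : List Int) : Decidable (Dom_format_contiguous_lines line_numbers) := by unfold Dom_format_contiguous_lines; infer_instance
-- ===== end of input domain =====

-- B replaces A's stateful run-tracking loop with stateless neighbour comparisons: it builds the run-start and run-end lists independently and zips them (objective: alternative, same cost).

-- ===== PORT A =====
-- loop body of A's 'for i in range(1, len(line_numbers))'; indices i and i-1 are in range on the loop's domain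
def pvABody (xs : List Int) (acc : List String × Int × Int) (i : Int) : List String × Int × Int :=
  if PySem.List.pyGetD xs i 0 = PySem.List.pyGetD xs (i - 1) 0 + 1 then
    (acc.1, acc.2.1, PySem.List.pyGetD xs i 0)
  else
    ((acc.1 ++ [if acc.2.1 = acc.2.2 then PySem.Int.toStr acc.2.1
                else PySem.Int.toStr acc.2.1 ++ "-" ++ PySem.Int.toStr acc.2.2]),
     PySem.List.pyGetD xs i 0, PySem.List.pyGetD xs i 0)

def format_contiguous_lines (line_numbers : List Int) : String :=
  -- reads the first element; in range under Pre_ (nonempty input); Python raises IndexError on an empty list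
  let start0 := PySem.List.pyGetD line_numbers 0 0
  let st := (PySem.List.pyRange 1 (PySem.List.len line_numbers) 1).foldl (pvABody line_numbers) ([], start0, start0)
  PySem.Str.join ", "
    (st.1 ++ [if st.2.1 = st.2.2 then PySem.Int.toStr st.2.1
              else PySem.Int.toStr st.2.1 ++ "-" ++ PySem.Int.toStr st.2.2])

-- ===== PORT B =====
def format_contiguous_lines_alt (line_numbers : List Int) : String :=
  let n := PySem.List.len line_numbers
  -- starts comprehension: i == 0 or line_numbers[i] != line_numbers[i-1] + 1
  let starts := ((PySem.List.pyRange 0 n 1).filter (fun i =>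
      i == 0 || !(PySem.List.pyGetD line_numbers i 0 == PySem.List.pyGetD line_numbers (i - 1) 0 + 1))).map
      (fun i => PySem.List.pyGetD line_numbers i 0)
  -- ends comprehension: i == n - 1 or line_numbers[i+1] != line_numbers[i] + 1 (short-circuit: xs[i+1] never read when i = n-1)
  let ends := ((PySem.List.pyRange 0 n 1).filter (fun i =>
      i == n - 1 || !(PySem.List.pyGetD line_numbers (i + 1) 0 == PySem.List.pyGetD line_numbers i 0 + 1))).map
      (fun i => PySem.List.pyGetD line_numbers i 0)
  PySem.Str.join ", " ((starts.zip ends).map (fun p =>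
      if p.1 = p.2 then PySem.Int.toStr p.1
      else PySem.Int.toStr p.1 ++ "-" ++ PySem.Int.toStr p.2))

-- ===== PRECONDITION & SPEC =====
-- Pre_ excludes only the empty list, on which the Python A raises IndexError when reading the first element.
def Pre_format_contiguous_lines (line_numbers : List Int) : Prop := line_numbers ≠ []
instance (line_numbers : List Int) : Decidable (Pre_format_contiguous_lines line_numbers) := by unfold Pre_format_contiguous_lines; infer_instance
def pvWitness_format_contiguous_lines : List Int := [1, 2, 5]

def Spec_format_contiguous_lines (line_numbers : List Int) (out : String) : Prop := out = format_contiguous_lines_alt line_numbers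
instance (line_numbers : List Int) (out : String) : Decidable (Spec_format_contiguous_lines line_numbers out) := by unfold Spec_format_contiguous_lines; infer_instance

-- ===== CLAIM (what is proved, stated in full; the proofs are below) =====
def Claim_equal_format_contiguous_lines : Prop := ∀ (line_numbers : List Int), Dom_format_contiguous_lines line_numbers → Pre_format_contiguous_lines line_numbers → Spec_format_contiguous_lines line_numbers (format_contiguous_lines line_numbers)

-- ===== LEMMAS AND PROOFS =====

-- run formatter (definitionally the lambda used in B's port)
def pvFmtRun (run : Int × Int) : String :=
  if run.1 = run.2 then PySem.Int.toStr run.1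
  else PySem.Int.toStr run.1 ++ "-" ++ PySem.Int.toStr run.2

-- A's loop, re-expressed element-wise
def pvAStepE (acc : List String × Int × Int) (x : Int) : List String × Int × Int :=
  if x = acc.2.2 + 1 then (acc.1, acc.2.1, x)
  else (acc.1 ++ [pvFmtRun (acc.2.1, acc.2.2)], x, x)

-- reference run decomposition, shared by both proofs
def pvRuns : Int → Int → List Int → List (Int × Int)
  | s, e, [] => [(s, e)]
  | s, e, x :: t => if x = e + 1 then pvRuns s x t else (s, e) :: pvRuns x x t

def pvStartsAux : Int → List Int → List Int
  | _, [] => []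
  | p, x :: t => if x = p + 1 then pvStartsAux x t else x :: pvStartsAux x t

def pvEndsL : List Int → List Int
  | [] => []
  | [x] => [x]
  | x :: y :: t => if y = x + 1 then pvEndsL (y :: t) else x :: pvEndsL (y :: t)

lemma pvRuns_fst : ∀ (t : List Int) (s e : Int), (pvRuns s e t).map Prod.fst = s :: pvStartsAux e t := by
  intro t
  induction t with
  | nil => intro s e; simp [pvRuns, pvStartsAux]
  | cons x t' ih =>
    intro s e
    by_cases hc : x = e + 1 <;> simp [pvRuns, pvStartsAux, hc, ih]

lemma pvRuns_snd : ∀ (t : List Int) (s e : Int), (pvRuns s e t).map Prod.snd = pvEndsL (e :: t) := by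
  intro t
  induction t with
  | nil => intro s e; simp [pvRuns, pvEndsL]
  | cons x t' ih =>
    intro s e
    by_cases hc : x = e + 1 <;> simp [pvRuns, pvEndsL, hc, ih]

lemma pvFoldA_runs : ∀ (t : List Int) (fr : List String) (s e : Int),
    (t.foldl pvAStepE (fr, s, e)).1 ++
      [pvFmtRun ((t.foldl pvAStepE (fr, s, e)).2.1, (t.foldl pvAStepE (fr, s, e)).2.2)] =
    fr ++ (pvRuns s e t).map pvFmtRun := by
  intro t
  induction t with
  | nil => intro fr s e; simp [pvRuns]
  | cons x t' ih =>
    intro fr s e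
    by_cases hc : x = e + 1
    · simp only [List.foldl_cons]
      rw [show pvAStepE (fr, s, e) x = (fr, s, x) from by simp [pvAStepE, hc],
        show pvRuns s e (x :: t') = pvRuns s x t' from by simp [pvRuns, hc]]
      exact ih fr s x
    · simp only [List.foldl_cons]
      rw [show pvAStepE (fr, s, e) x = (fr ++ [pvFmtRun (s, e)], x, x) from by simp [pvAStepE, hc],
        show pvRuns s e (x :: t') = (s, e) :: pvRuns x x t' from by simp [pvRuns, hc]]
      rw [ih (fr ++ [pvFmtRun (s, e)]) x x]
      simp

-- A's index loop equals the element-wise fold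
lemma pvA_fold_elem (xs : List Int) :
    ∀ (t : List Int) (j : Nat) (fr : List String) (s : Int) (hj : j < xs.length),
      xs.drop (j + 1) = t →
      (PySem.List.pyRange ((j : Int) + 1) (PySem.List.len xs) 1).foldl (pvABody xs) (fr, s, xs[j]) =
        t.foldl pvAStepE (fr, s, xs[j]) := by
  intro t
  induction t with
  | nil =>
    intro j fr s hj ht
    have hlen : xs.length = j + 1 := by
      have := congrArg List.length ht; simp at this; omega
    rw [PySem.List.pyRange_one_eq_nil]
    · simp
    · simp [hlen]
  | cons x t' ih =>
    intro j fr s hj ht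
    have hlen : j + 1 < xs.length := by
      have := congrArg List.length ht; simp at this; omega
    have hx : xs[j + 1] = x := by
      have h0 : (xs.drop (j + 1))[0]'(by simp; omega) = x := by simp [ht]
      simpa using h0
    have ht' : xs.drop (j + 2) = t' := by
      have : (xs.drop (j + 1)).drop 1 = t' := by rw [ht]; simp
      simpa [List.drop_drop] using this
    rw [PySem.List.pyRange_one_cons (by simp; exact_mod_cast hlen)]
    simp only [List.foldl_cons]
    have hgj1 : PySem.List.pyGetD xs ((j : Int) + 1) 0 = xs[j + 1] := by
      have := PySem.List.pyGetD_natCast xs (j + 1) 0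
      push_cast at this ⊢
      rw [this, List.getD_eq_getElem xs 0 hlen]
    have hgj : PySem.List.pyGetD xs ((j : Int) + 1 - 1) 0 = xs[j] := by
      have h1 : (j : Int) + 1 - 1 = (j : Int) := by ring
      rw [h1]
      rw [PySem.List.pyGetD_natCast xs j 0, List.getD_eq_getElem xs 0 hj]
    have harith : ((j : Int) + 1) + 1 = ((j + 1 : Nat) : Int) + 1 := by push_cast; ring
    by_cases hc : x = xs[j] + 1
    · have : pvABody xs (fr, s, xs[j]) ((j : Int) + 1) = (fr, s, xs[j + 1]) := by
        simp [pvABody, hgj1, hx, hc, List.getElem?_eq_getElem hj]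
      rw [this, harith, ih (j + 1) fr s hlen ht']
      simp [pvAStepE, hx, hc]
    · have : pvABody xs (fr, s, xs[j]) ((j : Int) + 1) =
          (fr ++ [pvFmtRun (s, xs[j])], xs[j + 1], xs[j + 1]) := by
        simp [pvABody, pvFmtRun, hgj1, hx, hc, List.getElem?_eq_getElem hj]
      rw [this, harith, ih (j + 1) (fr ++ [pvFmtRun (s, xs[j])]) (xs[j + 1]) hlen ht']
      simp [pvAStepE, hx, hc]

-- B's starts comprehension, from index j ≥ 1, equals pvStartsAux with predecessor xs[j-1]
lemma pvB_starts_idx (xs : List Int) :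
    ∀ (t : List Int) (j : Nat), 1 ≤ j → xs.drop j = t →
      ((PySem.List.pyRange (j : Int) (PySem.List.len xs) 1).filter (fun i =>
          i == 0 || !(PySem.List.pyGetD xs i 0 == PySem.List.pyGetD xs (i - 1) 0 + 1))).map
        (fun i => PySem.List.pyGetD xs i 0) =
      pvStartsAux (PySem.List.pyGetD xs ((j : Int) - 1) 0) t := by
  intro t
  induction t with
  | nil =>
    intro j hj ht
    have hlen : xs.length ≤ j := by
      have := congrArg List.length ht; simp at this; omega
    rw [PySem.List.pyRange_one_eq_nil (by simp; exact_mod_cast hlen)]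
    simp [pvStartsAux]
  | cons x t' ih =>
    intro j hj ht
    have hlen : j < xs.length := by
      have := congrArg List.length ht; simp at this; omega
    have hx : PySem.List.pyGetD xs (j : Int) 0 = x := by
      rw [PySem.List.pyGetD_natCast xs j 0, List.getD_eq_getElem xs 0 hlen]
      have h0 : (xs.drop j)[0]'(by simp; omega) = x := by simp [ht]
      simpa using h0
    have ht' : xs.drop (j + 1) = t' := by
      have : (xs.drop j).drop 1 = t' := by rw [ht]; simp
      simpa [List.drop_drop] using this
    have hcast : ((j : Int) + 1) = ((j + 1 : Nat) : Int) := by push_cast; ring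
    rw [PySem.List.pyRange_one_cons (by simp; exact_mod_cast hlen)]
    have hj0 : ((j : Int) == 0) = false := by
      simp; omega
    by_cases hc : x = PySem.List.pyGetD xs ((j : Int) - 1) 0 + 1
    · rw [List.filter_cons_of_neg (by simp [hj0, hx, hc])]
      rw [hcast, ih (j + 1) (by omega) ht']
      have : ((j + 1 : Nat) : Int) - 1 = (j : Int) := by push_cast; ring
      rw [this, hx]
      simp [pvStartsAux, hc]
    · rw [List.filter_cons_of_pos (by simp [hj0, hx]; exact hc)]
      simp only [List.map_cons, hx]
      rw [hcast, ih (j + 1) (by omega) ht']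
      have : ((j + 1 : Nat) : Int) - 1 = (j : Int) := by push_cast; ring
      rw [this, hx]
      simp [pvStartsAux, hc]

-- B's ends comprehension, from index j, equals pvEndsL of the suffix
lemma pvB_ends_idx (xs : List Int) :
    ∀ (t : List Int) (j : Nat), xs.drop j = t →
      ((PySem.List.pyRange (j : Int) (PySem.List.len xs) 1).filter (fun i =>
          i == (PySem.List.len xs) - 1 || !(PySem.List.pyGetD xs (i + 1) 0 == PySem.List.pyGetD xs i 0 + 1))).map
        (fun i => PySem.List.pyGetD xs i 0) =
      pvEndsL t := by
  intro t
  induction t with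
  | nil =>
    intro j ht
    have hlen : xs.length ≤ j := by
      have := congrArg List.length ht; simp at this; omega
    rw [PySem.List.pyRange_one_eq_nil (by simp; exact_mod_cast hlen)]
    simp [pvEndsL]
  | cons x t' ih =>
    intro j ht
    have hlen : j < xs.length := by
      have := congrArg List.length ht; simp at this; omega
    have hx : PySem.List.pyGetD xs (j : Int) 0 = x := by
      rw [PySem.List.pyGetD_natCast xs j 0, List.getD_eq_getElem xs 0 hlen]
      have h0 : (xs.drop j)[0]'(by simp; omega) = x := by simp [ht]
      simpa using h0
    have ht' : xs.drop (j + 1) = t' := by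
      have : (xs.drop j).drop 1 = t' := by rw [ht]; simp
      simpa [List.drop_drop] using this
    have hcast : ((j : Int) + 1) = ((j + 1 : Nat) : Int) := by push_cast; ring
    have hlen' : xs.length = j + 1 + t'.length := by
      have := congrArg List.length ht; simp at this; omega
    rw [PySem.List.pyRange_one_cons (by simp; exact_mod_cast hlen)]
    cases t' with
    | nil =>
      -- last index: condition true via i == n - 1
      have hlen'' : xs.length = j + 1 := by simpa using hlen'
      rw [List.filter_cons_of_pos (by simp [PySem.List.len]; left; omega)]
      simp only [List.map_cons, hx]
      rw [hcast, ih (j + 1) ht']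
      simp [pvEndsL]
    | cons y t'' =>
      have hne : ¬ ((j : Int) = ((xs.length : Int)) - 1) := by
        have := hlen'; simp at this; omega
      have hy : PySem.List.pyGetD xs ((j : Int) + 1) 0 = y := by
        rw [hcast, PySem.List.pyGetD_natCast xs (j + 1) 0,
          List.getD_eq_getElem xs 0 (by omega)]
        have h0 : (xs.drop (j + 1))[0]'(by rw [ht']; simp) = y := by simp [ht']
        simpa using h0
      by_cases hc : y = x + 1
      · rw [List.filter_cons_of_neg (by
          simp [PySem.List.len, hx, hy, hc]
          exact hne)]
        rw [hcast, ih (j + 1) ht']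
        simp [pvEndsL, hc]
      · rw [List.filter_cons_of_pos (by simp [PySem.List.len, hx, hy]; exact Or.inr hc)]
        simp only [List.map_cons, hx]
        rw [hcast, ih (j + 1) ht']
        simp [pvEndsL, hc]

-- ===== VERDICT (by name: the statement is the Claim_ definition above) =====
theorem format_contiguous_lines_spec : Claim_equal_format_contiguous_lines := by
  intro xs _ hpre
  unfold Spec_format_contiguous_lines
  obtain ⟨h, t, rfl⟩ : ∃ h t, xs = h :: t := by
    cases xs with
    | nil => exact absurd rfl hpre
    | cons h t => exact ⟨h, t, rfl⟩
  have h0 : PySem.List.pyGetD (h :: t) 0 0 = h := PySem.List.pyGetD_zero_cons h t 0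
  -- A's side equals join of the run decomposition
  have hA : format_contiguous_lines (h :: t) =
      PySem.Str.join ", " ((pvRuns h h t).map pvFmtRun) := by
    have hdrop : (h :: t).drop (0 + 1) = t := by simp
    have hfold := pvA_fold_elem (h :: t) t 0 [] h (by simp) hdrop
    simp only [Nat.cast_zero, zero_add] at hfold
    have hrun := pvFoldA_runs t [] h h
    simp only [List.nil_append] at hrun
    simp only [format_contiguous_lines, h0]
    show PySem.Str.join ", " _ = _
    simp only [List.getElem_cons_zero] at hfold
    rw [hfold]
    exact congrArg (PySem.Str.join ", ") hrun
  -- B's side equals the same join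
  have hB : format_contiguous_lines_alt (h :: t) =
      PySem.Str.join ", " ((pvRuns h h t).map pvFmtRun) := by
    have hn : (0 : Int) < PySem.List.len (h :: t) := by simp [PySem.List.len]
    have hstarts :
        ((PySem.List.pyRange 0 (PySem.List.len (h :: t)) 1).filter (fun i =>
            i == 0 || !(PySem.List.pyGetD (h :: t) i 0 == PySem.List.pyGetD (h :: t) (i - 1) 0 + 1))).map
          (fun i => PySem.List.pyGetD (h :: t) i 0) =
        (pvRuns h h t).map Prod.fst := by
      rw [PySem.List.pyRange_one_cons hn]
      rw [List.filter_cons_of_pos (by simp)]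
      simp only [List.map_cons, h0, zero_add]
      have := pvB_starts_idx (h :: t) t 1 (by omega) (by simp)
      simp only [Nat.cast_one] at this
      rw [this]
      have : ((1 : Int) - 1) = (0 : Int) := by ring
      rw [this, h0, pvRuns_fst]
    have hends :
        ((PySem.List.pyRange 0 (PySem.List.len (h :: t)) 1).filter (fun i =>
            i == (PySem.List.len (h :: t)) - 1 || !(PySem.List.pyGetD (h :: t) (i + 1) 0 == PySem.List.pyGetD (h :: t) i 0 + 1))).map
          (fun i => PySem.List.pyGetD (h :: t) i 0) =
        (pvRuns h h t).map Prod.snd := by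
      have := pvB_ends_idx (h :: t) (h :: t) 0 (by simp)
      simp only [Nat.cast_zero] at this
      rw [this, pvRuns_snd]
    simp only [format_contiguous_lines_alt]
    rw [hstarts, hends, List.zip_map']
    congr 1
    simp [pvFmtRun]
  rw [hA, hB]
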